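-- pv_equiv track=rewrite | github.com/JohnDorsey/RelentlessFractals | SegmentGeometry.py | multi_traverse
-- ===== SOURCE A (Python) =====
-- def multi_traverse(data, count=None):
--     assert iter(data) is not iter(data)
--     assert count > 0
--     if count == 1:
--         for item in data:
--             yield (item,)
--     else:
--         for item in data:
--             for extension in multi_traverse(data, count=count-1):
--                 yield (item,) + extension
-- ===== SOURCE B (Python) =====
-- def multi_traverse(data, count=None):
--     assert iter(data) is not iter(data)
--     assert count > 0
--     results = [()]
--     for _ in range(count):
--         results = [prefix + (item,) for prefix in results for item in data]
--     yield from results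
-- ===== Notes on version B (the rewrite author's own statement) =====
-- stated objective: alternative
-- what changed: Replaces recursion on count (nested generators prepending the head element) with an iterative accumulator that extends every prefix by one element per loop round.
import Mathlib
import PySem

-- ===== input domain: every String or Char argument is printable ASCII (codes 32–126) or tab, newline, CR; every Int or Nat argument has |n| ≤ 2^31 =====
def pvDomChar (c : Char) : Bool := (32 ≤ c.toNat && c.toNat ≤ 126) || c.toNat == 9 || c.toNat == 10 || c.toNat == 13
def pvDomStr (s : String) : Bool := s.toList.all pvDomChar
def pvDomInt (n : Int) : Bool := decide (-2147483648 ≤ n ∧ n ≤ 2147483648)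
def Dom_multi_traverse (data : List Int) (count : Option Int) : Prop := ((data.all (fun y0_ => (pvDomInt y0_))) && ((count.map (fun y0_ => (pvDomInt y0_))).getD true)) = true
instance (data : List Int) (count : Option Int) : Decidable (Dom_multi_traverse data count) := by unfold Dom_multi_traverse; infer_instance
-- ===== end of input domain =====

-- B rewrites A's recursion on count as an iterative accumulator extended once per round (objective: alternative).
-- Both Pythons are generators; outside Pre_ (count None or ≤ 0) both raise on first next(), so only Pre_ inputs are claimed.

-- ===== PORT A =====
-- A recurses on count: count == 1 yields singletons, otherwise prepends each item to each tuple of the recursive call.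
def multi_traverse_A_rec (data : List Int) : Nat → List (List Int)
  | 0 => []                                    -- unreachable under Pre_ (count > 0)
  | 1 => data.map (fun item => [item])
  | n + 2 => data.flatMap (fun item => (multi_traverse_A_rec data (n + 1)).map (fun ext => item :: ext))

def multi_traverse (data : List Int) (count : Option Int) : List (List Int) :=
  match count with
  | none => []                                 -- A raises TypeError (None > 0); outside Pre_
  | some c => if 0 < c then multi_traverse_A_rec data c.toNat else []  -- else: assert fails, outside Pre_

-- ===== PORT B =====
-- B loops count times, each round extending every accumulated prefix by each item of data.
def multi_traverse_B_step (data : List Int) (results : List (List Int)) : List (List Int) :=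
  results.flatMap (fun prefixL => data.map (fun item => prefixL ++ [item]))

def multi_traverse_B_loop (data : List Int) : Nat → List (List Int) → List (List Int)
  | 0, results => results
  | n + 1, results => multi_traverse_B_loop data n (multi_traverse_B_step data results)

def multi_traverse_alt (data : List Int) (count : Option Int) : List (List Int) :=
  match count with
  | none => []                                 -- assert raises; outside Pre_
  | some c => if 0 < c then multi_traverse_B_loop data c.toNat [[]] else []

-- ===== PRECONDITION & SPEC =====
-- Pre_ excludes exactly the inputs where A raises: count = None (TypeError in 'count > 0') or count ≤ 0 (AssertionError).
def Pre_multi_traverse (data : List Int) (count : Option Int) : Prop := 0 < count.getD 0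
instance (data : List Int) (count : Option Int) : Decidable (Pre_multi_traverse data count) := by unfold Pre_multi_traverse; infer_instance
def pvWitness_multi_traverse : List Int × Option Int := ([1, 2], some 2)

def Spec_multi_traverse (data : List Int) (count : Option Int) (out : List (List Int)) : Prop := out = multi_traverse_alt data count
instance (data : List Int) (count : Option Int) (out : List (List Int)) : Decidable (Spec_multi_traverse data count out) := by unfold Spec_multi_traverse; infer_instance

-- ===== CLAIM (what is proved, stated in full; the proofs are below) =====
def Claim_equal_multi_traverse : Prop := ∀ (data : List Int) (count : Option Int), Dom_multi_traverse data count → Pre_multi_traverse data count → Spec_multi_traverse data count (multi_traverse data count)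

-- ===== LEMMAS AND PROOFS =====

-- B's loop applied to an intermediate state factors one step off the back.
lemma B_loop_snoc (data : List Int) (n : Nat) (r : List (List Int)) :
    multi_traverse_B_loop data (n + 1) r
      = multi_traverse_B_step data (multi_traverse_B_loop data n r) := by
  induction n generalizing r with
  | zero => rfl
  | succ k ih =>
      show multi_traverse_B_loop data (k + 1) (multi_traverse_B_step data r)
            = multi_traverse_B_step data (multi_traverse_B_loop data (k + 1) r)
      rw [ih, multi_traverse_B_loop]

-- Appending at the end commutes with prepending the head across the whole product list.
lemma A_rec_step (data : List Int) (n : Nat) (hn : 1 ≤ n) :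
    multi_traverse_B_step data (multi_traverse_A_rec data n)
      = multi_traverse_A_rec data (n + 1) := by
  induction n with
  | zero => omega
  | succ k ih =>
      cases k with
      | zero =>
          simp [multi_traverse_A_rec, multi_traverse_B_step, List.flatMap_map, Function.comp_def]
      | succ m =>
          have ihm := ih (by omega)
          show multi_traverse_B_step data (multi_traverse_A_rec data (m + 2))
                = multi_traverse_A_rec data (m + 3)
          rw [show multi_traverse_A_rec data (m + 2)
                = data.flatMap (fun item => (multi_traverse_A_rec data (m + 1)).map (fun ext => item :: ext)) from rfl]
          rw [show multi_traverse_A_rec data (m + 3)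
                = data.flatMap (fun item => (multi_traverse_A_rec data (m + 2)).map (fun ext => item :: ext)) from rfl]
          rw [← ihm]
          simp [multi_traverse_B_step, List.flatMap_assoc, List.map_flatMap, List.flatMap_map, Function.comp_def]

-- Main bridge: A's recursion equals B's accumulator loop for every positive depth.
lemma A_eq_B_nat (data : List Int) (n : Nat) (hn : 1 ≤ n) :
    multi_traverse_A_rec data n = multi_traverse_B_loop data n [[]] := by
  induction n with
  | zero => omega
  | succ k ih =>
      cases k with
      | zero => simp [multi_traverse_A_rec, multi_traverse_B_loop, multi_traverse_B_step]
      | succ m =>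
          rw [B_loop_snoc, ← ih (by omega), A_rec_step data (m + 1) (by omega)]

-- ===== VERDICT (by name: the statement is the Claim_ definition above) =====
theorem multi_traverse_spec : Claim_equal_multi_traverse := by
  intro data count _ hpre
  cases count with
  | none => simp [Pre_multi_traverse] at hpre
  | some c =>
      have hc : 0 < c := by simpa [Pre_multi_traverse] using hpre
      show multi_traverse data (some c) = multi_traverse_alt data (some c)
      simp only [multi_traverse, multi_traverse_alt, if_pos hc]
      exact A_eq_B_nat data c.toNat (by omega)
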